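-- pv_equiv track=rewrite | github.com/IsThatYou/Competitive-Programming | ieeextrme10alpha/draughts.py | del_black
-- ===== SOURCE A (Python) =====
-- def del_black(oboard, origin, target):
--     board = oboard[:]
--     if target[0] - origin[0] == 0:
--         if target[1] - origin[1] > 0:
--             for i in range(origin[1]+1, target[1]):
--                 if board[origin[0]][i] == 'x':
--                     board[origin[0]] = list(board[origin[0]])
--                     board[origin[0]][i] = '.'
--                     board[origin[0]] = ''.join(board[origin[0]])
--         elif target[1] - origin[1] < 0:
--             for i in range(target[1] + 1, origin[1]):
--                 if board[origin[0]][i] == 'x':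
--                     board[origin[0]] = list(board[origin[0]])
--                     board[origin[0]][i] = '.'
--                     board[origin[0]] = ''.join(board[origin[0]])
--
--     elif target[1] - origin[1] == 0:
--         if target[0] - origin[0] > 0:
--             for i in range(origin[0] + 1, target[0]):
--                 if board[i][origin[1]] == 'x':
--                     board[i] = list(board[i])
--                     board[i][origin[1]] = '.'
--                     board[i] = ''.join(board[i])
--
--         elif target[0] - origin[0] < 0:
--
--             for i in range(target[0] + 1, origin[0]):
--                 if board[i][origin[1]] == 'x':
--                     board[i] = list(board[i])
--                     board[i][origin[1]] = '.'
--                     board[i] = ''.join(board[i])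
--
--     return board
-- ===== SOURCE B (Python) =====
-- def del_black(oboard, origin, target):
--     dr = target[0] - origin[0]
--     dc = target[1] - origin[1]
--     if dr == 0 and dc != 0:
--         lo, hi = min(origin[1], target[1]), max(origin[1], target[1])
--         between = lambda r, c: r == origin[0] and lo < c < hi
--     elif dc == 0 and dr != 0:
--         lo, hi = min(origin[0], target[0]), max(origin[0], target[0])
--         between = lambda r, c: c == origin[1] and lo < r < hi
--     else:
--         return oboard[:]
--     return [''.join('.' if ch == 'x' and between(r, c) else ch
--                     for c, ch in enumerate(row))
--             for r, row in enumerate(oboard)]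
-- ===== Notes on version B (the rewrite author's own statement) =====
-- stated objective: alternative
-- what changed: B rebuilds the whole board as a single per-cell map (nested enumerate comprehension: a char becomes '.' iff it is 'x' and its coordinates lie strictly between origin and target on the shared row/column), replacing A's four directional loops that walk the move line and splice row strings in place.
-- outside the precondition, e.g. on del_black(['xx'], (0, -3), (0, 1)): A returns ['..'], B returns ['.x']
import Mathlib
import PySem

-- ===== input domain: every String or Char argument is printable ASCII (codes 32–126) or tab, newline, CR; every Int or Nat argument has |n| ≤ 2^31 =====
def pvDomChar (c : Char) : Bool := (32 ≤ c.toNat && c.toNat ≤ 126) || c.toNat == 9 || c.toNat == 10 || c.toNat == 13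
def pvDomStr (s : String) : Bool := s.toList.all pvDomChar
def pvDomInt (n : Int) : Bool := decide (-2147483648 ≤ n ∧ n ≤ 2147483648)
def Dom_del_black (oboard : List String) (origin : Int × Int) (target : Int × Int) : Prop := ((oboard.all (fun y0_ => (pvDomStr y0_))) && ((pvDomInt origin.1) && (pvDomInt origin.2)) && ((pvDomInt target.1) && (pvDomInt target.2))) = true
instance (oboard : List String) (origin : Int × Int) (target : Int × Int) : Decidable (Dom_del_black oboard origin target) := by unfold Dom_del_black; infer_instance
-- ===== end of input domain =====

-- B rebuilds the whole board as one per-cell map (nested enumerate: a char becomes '.' iff it is 'x'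
-- and lies strictly between origin and target on the shared row/column) instead of A's four directional
-- loops that walk the line splicing row strings (objective: alternative decomposition, similar cost).
-- Pre_ restricts to the natural board domain: it excludes inputs where A raises IndexError and straight
-- moves that address cells through negative Python indices.


-- ===== PORT A =====
-- A's loop body: if board[r][c] == 'x': board[r] = list → set '.' → join.
-- pyGet? board r = none is where the Python raises IndexError (excluded by Pre_).
def aStep (b : List String) (r : Int) (c : Int) : List String :=
  match PySem.List.pyGet? b r with
  | none => b
  | some row =>
    if PySem.Str.pyGet? row c = some 'x' then
      PySem.List.pySetD b r (String.ofList (PySem.List.pySetD row.toList c '.'))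
    else b

def del_black (oboard : List String) (origin : Int × Int) (target : Int × Int) : List String :=
  if target.1 - origin.1 = 0 then
    if target.2 - origin.2 > 0 then
      (PySem.List.pyRange (origin.2 + 1) target.2 1).foldl (fun b i => aStep b origin.1 i) oboard
    else if target.2 - origin.2 < 0 then
      (PySem.List.pyRange (target.2 + 1) origin.2 1).foldl (fun b i => aStep b origin.1 i) oboard
    else oboard
  else if target.2 - origin.2 = 0 then
    if target.1 - origin.1 > 0 then
      (PySem.List.pyRange (origin.1 + 1) target.1 1).foldl (fun b i => aStep b i origin.2) oboard
    else if target.1 - origin.1 < 0 then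
      (PySem.List.pyRange (target.1 + 1) origin.1 1).foldl (fun b i => aStep b i origin.2) oboard
    else oboard
  else oboard

-- ===== PORT B =====
-- B's comprehension: [''.join('.' if ch == 'x' and between(r, c) else ch for c, ch in enumerate(row))
--                     for r, row in enumerate(oboard)]
def rebuild (oboard : List String) (between : Int → Int → Bool) : List String :=
  (PySem.List.enumerate oboard 0).map (fun p =>
    String.ofList ((PySem.List.enumerate p.2.toList 0).map (fun q =>
      if q.2 = 'x' ∧ between p.1 q.1 = true then '.' else q.2)))

def del_black_alt (oboard : List String) (origin : Int × Int) (target : Int × Int) : List String :=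
  let dr := target.1 - origin.1
  let dc := target.2 - origin.2
  if dr = 0 ∧ dc ≠ 0 then
    rebuild oboard (fun r c =>
      decide (r = origin.1 ∧ min origin.2 target.2 < c ∧ c < max origin.2 target.2))
  else if dc = 0 ∧ dr ≠ 0 then
    rebuild oboard (fun r c =>
      decide (c = origin.2 ∧ min origin.1 target.1 < r ∧ r < max origin.1 target.1))
  else oboard

-- ===== PRECONDITION & SPEC =====
-- Pre_ excludes the inputs on which Python A raises IndexError, and the straight moves whose
-- visited coordinates are negative — those lie outside the natural board domain (A reads cells
-- there through Python's negative-index wraparound, B addresses cells by nonnegative position).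
def Pre_del_black (oboard : List String) (origin : Int × Int) (target : Int × Int) : Prop :=
  if (target.1 - origin.1 = 0) ∧ (target.2 - origin.2 ≠ 0) then
    max origin.2 target.2 - min origin.2 target.2 ≤ 1 ∨
      (0 ≤ min origin.2 target.2 + 1 ∧ 0 ≤ origin.1 ∧ origin.1 < (oboard.length : Int) ∧
        max origin.2 target.2 - 1 < PySem.Str.len (PySem.List.pyGetD oboard origin.1 ""))
  else if (target.2 - origin.2 = 0) ∧ (target.1 - origin.1 ≠ 0) then
    max origin.1 target.1 - min origin.1 target.1 ≤ 1 ∨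
      (0 ≤ min origin.1 target.1 + 1 ∧ max origin.1 target.1 - 1 < (oboard.length : Int) ∧
        0 ≤ origin.2 ∧
        ∀ p ∈ PySem.List.enumerate oboard 0,
          (min origin.1 target.1 + 1 ≤ p.1 ∧ p.1 < max origin.1 target.1) →
            origin.2 < PySem.Str.len p.2)
  else True
instance (oboard : List String) (origin : Int × Int) (target : Int × Int) : Decidable (Pre_del_black oboard origin target) := by unfold Pre_del_black; infer_instance

def pvWitness_del_black : List String × (Int × Int) × (Int × Int) :=
  (["....", ".x.x", "...."], (1, 0), (1, 3))

def Spec_del_black (oboard : List String) (origin : Int × Int) (target : Int × Int) (out : List String) : Prop := out = del_black_alt oboard origin target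
instance (oboard : List String) (origin : Int × Int) (target : Int × Int) (out : List String) : Decidable (Spec_del_black oboard origin target out) := by unfold Spec_del_black; infer_instance

-- ===== CLAIM (what is proved, stated in full; the proofs are below) =====
def Claim_equal_del_black : Prop := ∀ (oboard : List String) (origin : Int × Int) (target : Int × Int), Dom_del_black oboard origin target → Pre_del_black oboard origin target → Spec_del_black oboard origin target (del_black oboard origin target)

-- ===== LEMMAS AND PROOFS =====

-- pointwise congruence of a map over an enumeration
theorem enumMap_congr {α β : Type} (l : List α) (s : Int) (f g : Int × α → β)
    (h : ∀ (k : Nat) (hk : k < l.length), f (s + k, l[k]) = g (s + k, l[k])) :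
    (PySem.List.enumerate l s).map f = (PySem.List.enumerate l s).map g := by
  apply List.map_congr_left
  intro p hp
  rw [PySem.List.mem_enumerate_iff] at hp
  obtain ⟨k, hk, rfl⟩ := hp
  exact h k hk

-- a map over an enumeration that changes nothing is the list itself
theorem enumMap_id {α : Type} (l : List α) (s : Int) (f : Int × α → α)
    (h : ∀ (k : Nat) (hk : k < l.length), f (s + k, l[k]) = l[k]) :
    (PySem.List.enumerate l s).map f = l := by
  rw [enumMap_congr l s f (fun p => p.2) h]
  exact PySem.List.map_snd_enumerate l s

-- two stacked enumerate-maps are one enumerate-map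
theorem enumMap_comp {α : Type} (l : List α) (s : Int) (f g : Int × α → α) :
    (PySem.List.enumerate ((PySem.List.enumerate l s).map f) s).map g
      = (PySem.List.enumerate l s).map (fun p => g (p.1, f p)) := by
  induction l generalizing s with
  | nil => simp [PySem.List.enumerate_nil]
  | cons x xs ih => simp [PySem.List.enumerate_cons, ih]

-- list.set as an enumerate-map
theorem set_eq_enumMap {α : Type} (l : List α) (i : Int) (v : α) (h0 : 0 ≤ i) :
    l.set i.toNat v = (PySem.List.enumerate l 0).map (fun p => if p.1 = i then v else p.2) := by
  apply List.ext_getElem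
  · simp [PySem.List.length_enumerate]
  · intro k h1 h2
    rw [List.getElem_map, PySem.List.getElem_enumerate, List.getElem_set]
    simp only []
    split_ifs with ha hb hb
    · rfl
    · exfalso; omega
    · exfalso; omega
    · rfl

-- one clearing step of A on a row, as a list operation
def rowClear (l : List Char) (i : Int) : List Char :=
  if PySem.List.pyGet? l i = some 'x' then PySem.List.pySetD l i '.' else l

theorem rowClear_eq_enumMap (l : List Char) (i : Int) (h0 : 0 ≤ i) :
    rowClear l i
      = (PySem.List.enumerate l 0).map (fun p => if p.2 = 'x' ∧ p.1 = i then '.' else p.2) := by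
  unfold rowClear
  rw [PySem.List.pyGet?_of_nonneg l h0]
  by_cases hfire : l[i.toNat]? = some 'x'
  · rw [if_pos hfire]
    rw [PySem.List.pySetD_of_nonneg l '.' h0, set_eq_enumMap l i '.' h0]
    apply enumMap_congr
    intro k hk
    by_cases hki : (0 : Int) + k = i
    · have hkn : k = i.toNat := by omega
      subst hkn
      have hx : l[i.toNat] = 'x' := by
        rw [List.getElem?_eq_getElem hk] at hfire
        exact Option.some.inj hfire
      rw [if_pos hki, if_pos ⟨hx, hki⟩]
    · rw [if_neg hki, if_neg (by rintro ⟨_, h⟩; exact hki h)]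
  · rw [if_neg hfire]
    symm
    apply enumMap_id
    intro k hk
    by_cases hki : (0 : Int) + k = i
    · have hkn : k = i.toNat := by omega
      subst hkn
      rw [if_neg]
      rintro ⟨hx, _⟩
      exact hfire (by rw [List.getElem?_eq_getElem hk]; exact congrArg some hx)
    · rw [if_neg (by rintro ⟨_, h⟩; exact hki h)]

-- clearing at one position then at a set of positions is clearing at their union
theorem clear_clear (x : Char) (P Q R : Prop) [Decidable P] [Decidable Q] [Decidable R]
    (hPQR : P ∨ Q ↔ R) :
    (if (if x = 'x' ∧ P then '.' else x) = 'x' ∧ Q then '.'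
      else (if x = 'x' ∧ P then '.' else x))
      = if x = 'x' ∧ R then '.' else x := by
  by_cases hx : x = 'x' <;> by_cases hP : P <;> by_cases hQ : Q <;>
    simp_all

-- A's inner loop over the columns of one row, as an enumerate-map
theorem rowFold_eq_enumMap (is : List Int) (l : List Char) (h : ∀ i ∈ is, 0 ≤ i) :
    is.foldl rowClear l
      = (PySem.List.enumerate l 0).map (fun p => if p.2 = 'x' ∧ p.1 ∈ is then '.' else p.2) := by
  induction is generalizing l with
  | nil =>
    simp only [List.foldl_nil, List.not_mem_nil, and_false, if_false]
    symm; exact enumMap_id l 0 _ (fun k hk => rfl)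
  | cons i is ih =>
    rw [List.foldl_cons, ih _ (fun j hj => h j (List.mem_cons_of_mem i hj)),
      rowClear_eq_enumMap l i (h i List.mem_cons_self), enumMap_comp]
    apply enumMap_congr
    intro k hk
    exact clear_clear l[k] _ _ _ (List.mem_cons (a := (0 : Int) + k)).symm

-- A's horizontal loop rewrites only row r of the board
theorem boardFoldH (is : List Int) (b : List String) (r : Int) (row : String)
    (h0 : 0 ≤ r) (hrow : PySem.List.pyGet? b r = some row) :
    is.foldl (fun bb i => aStep bb r i) b
      = PySem.List.pySetD b r (String.ofList (is.foldl rowClear row.toList)) := by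
  induction is generalizing b row with
  | nil =>
    rw [PySem.List.pyGet?_of_nonneg b h0, List.getElem?_eq_some_iff] at hrow
    obtain ⟨hlen, hval⟩ := hrow
    rw [List.foldl_nil, List.foldl_nil, String.ofList_toList,
      PySem.List.pySetD_of_nonneg b row h0, ← hval, List.set_getElem_self hlen]
  | cons i is ih =>
    rw [List.foldl_cons, List.foldl_cons]
    have hstep : aStep b r i
        = PySem.List.pySetD b r (String.ofList (rowClear row.toList i)) := by
      unfold aStep rowClear
      rw [hrow]
      show (if PySem.Str.pyGet? row i = some 'x' then
          PySem.List.pySetD b r (String.ofList (PySem.List.pySetD row.toList i '.'))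
        else b) = _
      have hch : PySem.Str.pyGet? row i = PySem.List.pyGet? row.toList i := rfl
      rw [hch]
      split_ifs with hfire
      · rfl
      · rw [PySem.List.pyGet?_of_nonneg b h0, List.getElem?_eq_some_iff] at hrow
        obtain ⟨hlen, hval⟩ := hrow
        rw [String.ofList_toList, PySem.List.pySetD_of_nonneg b row h0, ← hval, List.set_getElem_self hlen]
    rw [hstep]
    have hlen' : r.toNat < b.length := by
      rw [PySem.List.pyGet?_of_nonneg b h0, List.getElem?_eq_some_iff] at hrow
      exact hrow.1
    have hrow' : PySem.List.pyGet? (PySem.List.pySetD b r (String.ofList (rowClear row.toList i))) r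
        = some (String.ofList (rowClear row.toList i)) := by
      rw [PySem.List.pySetD_of_nonneg b _ h0, PySem.List.pyGet?_of_nonneg _ h0,
        List.getElem?_eq_some_iff]
      exact ⟨by simpa using hlen', by rw [List.getElem_set]; simp⟩
    rw [ih _ _ hrow', PySem.List.pySetD_of_nonneg _ _ h0, PySem.List.pySetD_of_nonneg _ _ h0,
      PySem.List.pySetD_of_nonneg _ _ h0, List.set_set, String.toList_ofList]

-- A's clearing of one row at a fixed column, as a string function
def rowClearAt (c : Int) (row : String) : String :=
  if PySem.Str.pyGet? row c = some 'x' then String.ofList (PySem.List.pySetD row.toList c '.') else row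

theorem rowClearAt_eq_ofList (c : Int) (row : String) :
    rowClearAt c row = String.ofList (rowClear row.toList c) := by
  unfold rowClearAt rowClear
  have hch : PySem.Str.pyGet? row c = PySem.List.pyGet? row.toList c := rfl
  rw [hch]
  split_ifs
  · rfl
  · rw [String.ofList_toList]

-- one vertical step of A, as an enumerate-map over the rows
theorem aStep_vert_eq_enumMap (b : List String) (i c : Int) (h0 : 0 ≤ i) :
    aStep b i c = (PySem.List.enumerate b 0).map (fun p => if p.1 = i then rowClearAt c p.2 else p.2) := by
  unfold aStep
  cases hget : PySem.List.pyGet? b i with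
  | none =>
    rw [PySem.List.pyGet?_of_nonneg b h0, List.getElem?_eq_none_iff] at hget
    symm
    apply enumMap_id
    intro k hk
    rw [if_neg (by intro hki; omega)]
  | some row =>
    have hget' := hget
    rw [PySem.List.pyGet?_of_nonneg b h0, List.getElem?_eq_some_iff] at hget'
    obtain ⟨hlen, hval⟩ := hget'
    show (if PySem.Str.pyGet? row c = some 'x' then
        PySem.List.pySetD b i (String.ofList (PySem.List.pySetD row.toList c '.'))
      else b) = _
    unfold rowClearAt
    split_ifs with hfire
    · rw [PySem.List.pySetD_of_nonneg b _ h0, set_eq_enumMap b i _ h0]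
      apply enumMap_congr
      intro k hk
      by_cases hki : (0 : Int) + k = i
      · have hkn : k = i.toNat := by omega
        subst hkn
        rw [if_pos hki, if_pos hki, hval, if_pos hfire]
      · rw [if_neg hki, if_neg hki]
    · symm
      apply enumMap_id
      intro k hk
      by_cases hki : (0 : Int) + k = i
      · have hkn : k = i.toNat := by omega
        subst hkn
        rw [if_pos hki, hval, if_neg hfire]
      · rw [if_neg hki]

-- A's vertical loop over distinct nonnegative row indices, as one enumerate-map
theorem boardFoldV (is : List Int) (b : List String) (c : Int)
    (h : ∀ i ∈ is, 0 ≤ i) (hnd : is.Nodup) :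
    is.foldl (fun bb i => aStep bb i c) b
      = (PySem.List.enumerate b 0).map (fun p => if p.1 ∈ is then rowClearAt c p.2 else p.2) := by
  induction is generalizing b with
  | nil =>
    simp only [List.foldl_nil, List.not_mem_nil, if_false]
    symm; exact enumMap_id b 0 _ (fun k hk => rfl)
  | cons i is ih =>
    have hnotmem : i ∉ is := (List.nodup_cons.mp hnd).1
    rw [List.foldl_cons, ih _ (fun j hj => h j (List.mem_cons_of_mem i hj)) (List.nodup_cons.mp hnd).2,
      aStep_vert_eq_enumMap b i c (h i List.mem_cons_self), enumMap_comp]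
    apply enumMap_congr
    intro k hk
    simp only [List.mem_cons]
    by_cases hki : (0 : Int) + k = i
    · rw [if_pos hki, if_neg (by rw [hki]; exact hnotmem), if_pos (Or.inl hki)]
    · by_cases hmem : ((0 : Int) + k) ∈ is
      · rw [if_neg hki, if_pos hmem, if_pos (Or.inr hmem)]
      · rw [if_neg hki, if_neg hmem, if_neg (by rintro (h' | h') <;> [exact hki h'; exact hmem h'])]

-- a rebuild whose predicate never fires is the identity
theorem rebuild_id (oboard : List String) (f : Int → Int → Bool) (h : ∀ r c, f r c = false) :
    rebuild oboard f = oboard := by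
  unfold rebuild
  apply enumMap_id
  intro k hk
  have : (PySem.List.enumerate (oboard[k].toList) 0).map
      (fun q => if q.2 = 'x' ∧ f ((0 : Int) + k) q.1 = true then '.' else q.2) = oboard[k].toList := by
    apply enumMap_id
    intro j hj
    rw [if_neg (by rintro ⟨_, hf⟩; rw [h] at hf; exact absurd hf (by decide))]
  rw [this, String.ofList_toList]

-- the horizontal case: A's loop over columns (lo, hi) of row r0 equals B's rebuild
theorem mainH (oboard : List String) (r0 lo hi : Int)
    (h0r : 0 ≤ r0) (hrn : r0 < (oboard.length : Int)) (hlo : 0 ≤ lo + 1) :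
    (PySem.List.pyRange (lo + 1) hi 1).foldl (fun b i => aStep b r0 i) oboard
      = rebuild oboard (fun r c => decide (r = r0 ∧ lo < c ∧ c < hi)) := by
  have hlen : r0.toNat < oboard.length := by omega
  have hrow : PySem.List.pyGet? oboard r0 = some oboard[r0.toNat] := by
    rw [PySem.List.pyGet?_of_nonneg oboard h0r, List.getElem?_eq_some_iff]
    exact ⟨hlen, rfl⟩
  rw [boardFoldH _ _ _ _ h0r hrow,
    rowFold_eq_enumMap _ _ (fun i hi => by rw [PySem.List.mem_pyRange_one] at hi; omega),
    PySem.List.pySetD_of_nonneg _ _ h0r, set_eq_enumMap _ _ _ h0r]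
  unfold rebuild
  apply enumMap_congr
  intro k hk
  by_cases hki : (0 : Int) + k = r0
  · rw [if_pos hki]
    have hkn : k = r0.toNat := by omega
    subst hkn
    congr 1
    apply enumMap_congr
    intro j hj
    by_cases hx : oboard[r0.toNat].toList[j] = 'x' <;>
      by_cases hcond : lo < (0 : Int) + j ∧ (0 : Int) + j < hi
    · rw [if_pos ⟨hx, by rw [PySem.List.mem_pyRange_one]; omega⟩,
        if_pos ⟨hx, by rw [decide_eq_true_iff]; exact ⟨hki, hcond⟩⟩]
    · rw [if_neg (by rintro ⟨_, hm⟩; rw [PySem.List.mem_pyRange_one] at hm; omega),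
        if_neg (by rintro ⟨_, hd⟩; rw [decide_eq_true_iff] at hd; exact hcond hd.2)]
    · rw [if_neg (by rintro ⟨h', _⟩; exact hx h'), if_neg (by rintro ⟨h', _⟩; exact hx h')]
    · rw [if_neg (by rintro ⟨h', _⟩; exact hx h'), if_neg (by rintro ⟨h', _⟩; exact hx h')]
  · rw [if_neg hki]
    have : (PySem.List.enumerate (oboard[k].toList) 0).map
        (fun q => if q.2 = 'x' ∧ decide ((0 : Int) + k = r0 ∧ lo < q.1 ∧ q.1 < hi) = true
          then '.' else q.2) = oboard[k].toList := by
      apply enumMap_id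
      intro j hj
      rw [if_neg (by rintro ⟨_, hd⟩; rw [decide_eq_true_iff] at hd; exact hki hd.1)]
    rw [this, String.ofList_toList]

-- the vertical case: A's loop over rows (lo, hi) at column c0 equals B's rebuild
theorem mainV (oboard : List String) (c0 lo hi : Int)
    (hlo : 0 ≤ lo + 1) (hc0 : 0 ≤ c0) :
    (PySem.List.pyRange (lo + 1) hi 1).foldl (fun b i => aStep b i c0) oboard
      = rebuild oboard (fun r c => decide (c = c0 ∧ lo < r ∧ r < hi)) := by
  rw [boardFoldV _ _ _ (fun i hi => by rw [PySem.List.mem_pyRange_one] at hi; omega)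
    (PySem.List.nodup_pyRange_one _ _)]
  unfold rebuild
  apply enumMap_congr
  intro k hk
  by_cases hmem : ((0 : Int) + k) ∈ PySem.List.pyRange (lo + 1) hi 1
  · rw [if_pos hmem, rowClearAt_eq_ofList, rowClear_eq_enumMap _ _ hc0]
    rw [PySem.List.mem_pyRange_one] at hmem
    congr 1
    apply enumMap_congr
    intro j hj
    by_cases hx : oboard[k].toList[j] = 'x' <;> by_cases hc : (0 : Int) + j = c0
    · rw [if_pos ⟨hx, hc⟩, if_pos ⟨hx, by rw [decide_eq_true_iff]; exact ⟨hc, by omega⟩⟩]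
    · rw [if_neg (by rintro ⟨_, h'⟩; exact hc h'),
        if_neg (by rintro ⟨_, hd⟩; rw [decide_eq_true_iff] at hd; exact hc hd.1)]
    · rw [if_neg (by rintro ⟨h', _⟩; exact hx h'), if_neg (by rintro ⟨h', _⟩; exact hx h')]
    · rw [if_neg (by rintro ⟨h', _⟩; exact hx h'), if_neg (by rintro ⟨h', _⟩; exact hx h')]
  · rw [if_neg hmem]
    rw [PySem.List.mem_pyRange_one] at hmem
    have : (PySem.List.enumerate (oboard[k].toList) 0).map
        (fun q => if q.2 = 'x' ∧ decide (q.1 = c0 ∧ lo < (0 : Int) + k ∧ (0 : Int) + k < hi) = true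
          then '.' else q.2) = oboard[k].toList := by
      apply enumMap_id
      intro j hj
      rw [if_neg (by rintro ⟨_, hd⟩; rw [decide_eq_true_iff] at hd; exact hmem ⟨by omega, hd.2.2⟩)]
    rw [this, String.ofList_toList]

-- ===== VERDICT (by name: the statement is the Claim_ definition above) =====
theorem del_black_spec : Claim_equal_del_black := by
  intro oboard origin target _ hpre
  unfold Spec_del_black
  unfold Pre_del_black at hpre
  unfold del_black del_black_alt
  by_cases h1 : target.1 - origin.1 = 0 <;> by_cases h2 : target.2 - origin.2 = 0
  · -- zero move
    have c1 : ¬ (target.2 - origin.2 > 0) := by omega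
    have c2 : ¬ (target.2 - origin.2 < 0) := by omega
    simp [h1, h2]
  · -- horizontal
    rw [if_pos ⟨h1, h2⟩] at hpre
    simp only [if_pos h1, if_pos (And.intro h1 h2)]
    rcases hpre with hdeg | ⟨hlo, h0r, hrn, _⟩
    · -- degenerate: no strictly-between cell
      have hid : rebuild oboard (fun r c =>
          decide (r = origin.1 ∧ min origin.2 target.2 < c ∧ c < max origin.2 target.2)) = oboard := by
        apply rebuild_id
        intro r c
        apply decide_eq_false
        rintro ⟨_, hg1, hg2⟩
        omega
      rw [hid]
      rcases lt_or_gt_of_ne h2 with hlt | hgt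
      · have c1 : ¬ (target.2 - origin.2 > 0) := by omega
        rw [if_neg c1, if_pos hlt, PySem.List.pyRange_one_eq_nil (by omega), List.foldl_nil]
      · rw [if_pos hgt, PySem.List.pyRange_one_eq_nil (by omega), List.foldl_nil]
    · rcases lt_or_gt_of_ne h2 with hlt | hgt
      · have c1 : ¬ (target.2 - origin.2 > 0) := by omega
        have hmin : min origin.2 target.2 = target.2 := by omega
        have hmax : max origin.2 target.2 = origin.2 := by omega
        rw [if_neg c1, if_pos hlt, hmin, hmax]
        exact mainH oboard origin.1 target.2 origin.2 h0r hrn (by omega)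
      · have hmin : min origin.2 target.2 = origin.2 := by omega
        have hmax : max origin.2 target.2 = target.2 := by omega
        rw [if_pos hgt, hmin, hmax]
        exact mainH oboard origin.1 origin.2 target.2 h0r hrn (by omega)
  · -- vertical
    rw [if_neg (by rintro ⟨h', _⟩; exact h1 h'), if_pos ⟨h2, h1⟩] at hpre
    have hna : ¬ (target.1 - origin.1 = 0 ∧ target.2 - origin.2 ≠ 0) := by tauto
    simp only [if_neg h1, if_pos h2, if_neg hna, if_pos (And.intro h2 h1)]
    rcases hpre with hdeg | ⟨hlo, hhi, hc0, _⟩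
    · have hid : rebuild oboard (fun r c =>
          decide (c = origin.2 ∧ min origin.1 target.1 < r ∧ r < max origin.1 target.1)) = oboard := by
        apply rebuild_id
        intro r c
        apply decide_eq_false
        rintro ⟨_, hg1, hg2⟩
        omega
      rw [hid]
      rcases lt_or_gt_of_ne h1 with hlt | hgt
      · have c1 : ¬ (target.1 - origin.1 > 0) := by omega
        rw [if_neg c1, if_pos hlt, PySem.List.pyRange_one_eq_nil (by omega), List.foldl_nil]
      · rw [if_pos hgt, PySem.List.pyRange_one_eq_nil (by omega), List.foldl_nil]
    · rcases lt_or_gt_of_ne h1 with hlt | hgt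
      · have c1 : ¬ (target.1 - origin.1 > 0) := by omega
        have hmin : min origin.1 target.1 = target.1 := by omega
        have hmax : max origin.1 target.1 = origin.1 := by omega
        rw [if_neg c1, if_pos hlt, hmin, hmax]
        exact mainV oboard origin.2 target.1 origin.1 (by omega) hc0
      · have hmin : min origin.1 target.1 = origin.1 := by omega
        have hmax : max origin.1 target.1 = target.1 := by omega
        rw [if_pos hgt, hmin, hmax]
        exact mainV oboard origin.2 origin.1 target.1 (by omega) hc0
  · -- not a straight move
    have hna : ¬ (target.1 - origin.1 = 0 ∧ target.2 - origin.2 ≠ 0) := by tauto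
    have hnb : ¬ (target.2 - origin.2 = 0 ∧ target.1 - origin.1 ≠ 0) := by tauto
    simp [h1, h2]
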